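-- pv_equiv track=rewrite | github.com/afc1755/HFVL | bitFunctions.py | byte_to_bit
-- ===== SOURCE A (Python) =====
-- BYTE_BIT = {'0': '0000', '1': '0001', '2': '0010', '3': '0011', '4': '0100', '5': '0101', '6': '0110', '7': '0111',
--             '8': '1000', '9': '1001', 'a': '1010', 'b': '1011', 'c': '1100', 'd': '1101', 'e': '1110', 'f': '1111'}
--
-- def byte_to_bit(in_byte):
--     in_byte = in_byte.replace(' ', '')
--     in_bit = ''
--     for i in range(0, len(in_byte)):
--         in_bit += BYTE_BIT[in_byte[i]]
--         if (i + 1) % 2 == 0 and (i + 1) != len(in_byte):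
--             in_bit += ' '
--     return in_bit
-- ===== SOURCE B (Python) =====
-- BYTE_BIT = {'0': '0000', '1': '0001', '2': '0010', '3': '0011', '4': '0100', '5': '0101', '6': '0110', '7': '0111',
--             '8': '1000', '9': '1001', 'a': '1010', 'b': '1011', 'c': '1100', 'd': '1101', 'e': '1110', 'f': '1111'}
--
-- def byte_to_bit(in_byte):
--     s = in_byte.replace(' ', '')
--     parts = []
--     i = 0
--     while i < len(s):
--         parts.append(''.join(BYTE_BIT[c] for c in s[i:i+2]))
--         i += 2
--     return ' '.join(parts)
-- ===== Notes on version B (the rewrite author's own statement) =====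
-- stated objective: alternative
-- what changed: Replaces the per-character index loop with its parity spacing test ((i+1)%2==0 and (i+1)!=len) by chunking the stripped string into 2-character byte chunks, encoding each chunk, and space-joining the encoded chunks.
import Mathlib
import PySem

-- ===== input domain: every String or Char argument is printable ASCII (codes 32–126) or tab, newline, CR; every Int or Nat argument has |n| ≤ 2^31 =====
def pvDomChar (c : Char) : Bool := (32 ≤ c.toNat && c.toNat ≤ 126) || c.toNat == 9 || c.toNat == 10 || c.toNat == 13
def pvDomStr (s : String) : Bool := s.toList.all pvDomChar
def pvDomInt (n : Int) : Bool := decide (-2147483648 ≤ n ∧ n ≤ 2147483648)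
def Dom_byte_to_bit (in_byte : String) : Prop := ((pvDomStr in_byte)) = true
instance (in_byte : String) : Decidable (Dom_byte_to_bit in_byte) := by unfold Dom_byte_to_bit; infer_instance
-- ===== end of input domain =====

-- B re-decomposes A's indexed loop into chunk-then-join (alternative decomposition, same cost).

-- ===== PORT A =====
-- BYTE_BIT (shared module constant)
def pvBYTE_BIT : PySem.Dict Char String := PySem.Dict.ofList
  [('0', "0000"), ('1', "0001"), ('2', "0010"), ('3', "0011"), ('4', "0100"), ('5', "0101"),
   ('6', "0110"), ('7', "0111"), ('8', "1000"), ('9', "1001"), ('a', "1010"), ('b', "1011"),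
   ('c', "1100"), ('d', "1101"), ('e', "1110"), ('f', "1111")]

-- BYTE_BIT[c]: KeyError (chars outside the dict) is excluded by Pre_, so getD "" stands for the raising lookup
def byte_to_bit (in_byte : String) : String :=
  let s := (PySem.Str.replace in_byte " " "").toList
  let in_bit := (PySem.List.pyRange 0 (s.length : Int) 1).foldl
    (fun acc i =>
      let acc := acc ++ (pvBYTE_BIT.getD (PySem.List.pyGetD s i ' ') "").toList
      if PySem.Int.mod (i + 1) 2 == 0 && (i + 1) != (s.length : Int) then acc ++ [' '] else acc)
    ([] : List Char)
  String.ofList in_bit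

-- ===== PORT B =====
-- ''.join(BYTE_BIT[c] for c in chunk); KeyError excluded by Pre_ as in port A
def pvChunkBits (ch : List Char) : List Char := ch.flatMap (fun c => (pvBYTE_BIT.getD c "").toList)

-- the while loop: while i < len(s): parts.append(encode(s[i:i+2])); i += 2
def pvParts (s : List Char) (i : Nat) : List (List Char) :=
  if i < s.length then
    pvChunkBits (PySem.List.slice s (some (i : Int)) (some ((i : Int) + 2))) :: pvParts s (i + 2)
  else []
termination_by s.length - i

-- ' '.join(parts)
def pvJoin : List (List Char) → List Char
  | [] => []
  | [x] => x
  | x :: y :: rest => x ++ [' '] ++ pvJoin (y :: rest)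

def byte_to_bit_alt (in_byte : String) : String :=
  let s := (PySem.Str.replace in_byte " " "").toList
  String.ofList (pvJoin (pvParts s 0))

-- ===== PRECONDITION & SPEC =====
-- Pre_ excludes exactly the inputs on which A raises KeyError: any character other than
-- a blank or a lowercase hex digit (B raises there too).
def Pre_byte_to_bit (in_byte : String) : Prop :=
  (in_byte.toList.all (fun c => c ∈ "0123456789abcdef ".toList)) = true
instance (in_byte : String) : Decidable (Pre_byte_to_bit in_byte) := by
  unfold Pre_byte_to_bit; infer_instance
def pvWitness_byte_to_bit : String := "ab 01f"

def Spec_byte_to_bit (in_byte : String) (out : String) : Prop := out = byte_to_bit_alt in_byte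
instance (in_byte : String) (out : String) : Decidable (Spec_byte_to_bit in_byte out) := by
  unfold Spec_byte_to_bit; infer_instance

-- ===== CLAIM (what is proved, stated in full; the proofs are below) =====
def Claim_equal_byte_to_bit : Prop := ∀ (in_byte : String), Dom_byte_to_bit in_byte → Pre_byte_to_bit in_byte → Spec_byte_to_bit in_byte (byte_to_bit in_byte)

-- ===== LEMMAS AND PROOFS =====

-- what A's loop produces from position i on, as a recursion over the remaining suffix
def pvG : List Char → Nat → Nat → List Char
  | [], _, _ => []
  | c :: rest, i, n =>
      (pvBYTE_BIT.getD c "").toList ++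
      (if (i + 1) % 2 = 0 ∧ (i + 1) ≠ n then [' '] else []) ++ pvG rest (i + 1) n

lemma pv_loopA (s : List Char) :
    ∀ (rest : List Char) (i : Nat) (acc : List Char), s.drop i = rest →
    (PySem.List.pyRange (i : Int) (s.length : Int) 1).foldl
      (fun acc i =>
        let acc := acc ++ (pvBYTE_BIT.getD (PySem.List.pyGetD s i ' ') "").toList
        if PySem.Int.mod (i + 1) 2 == 0 && (i + 1) != (s.length : Int) then acc ++ [' '] else acc)
      acc = acc ++ pvG rest i s.length := by
  intro rest
  induction rest with
  | nil =>
      intro i acc hdrop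
      have hle : s.length ≤ i := by
        by_contra h
        have := List.drop_eq_nil_iff.mp hdrop
        omega
      rw [PySem.List.pyRange_one_eq_nil (by exact_mod_cast hle)]
      simp [pvG]
  | cons c rest ih =>
      intro i acc hdrop
      have hlt : i < s.length := by
        by_contra h
        have : s.drop i = [] := List.drop_eq_nil_iff.mpr (by omega)
        rw [this] at hdrop; exact (List.cons_ne_nil _ _) hdrop.symm
      have hget : s[i]? = some c := by
        have : (s.drop i)[0]? = some c := by rw [hdrop]; rfl
        simpa [List.getElem?_drop] using this
      rw [PySem.List.pyRange_one_cons (by exact_mod_cast hlt)]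
      rw [List.foldl_cons]
      have hget' : PySem.List.pyGetD s (i : Int) ' ' = c := by
        simp [PySem.List.pyGetD_natCast, hget]
      have hdrop' : s.drop (i + 1) = rest := by
        have h1 : s.drop (i + 1) = (s.drop i).drop 1 := by
          rw [List.drop_drop]
        rw [h1, hdrop]; rfl
      have hc : ((i : Int) + 1) = ((i + 1 : Nat) : Int) := by push_cast; ring
      rw [hc, ih (i + 1) _ hdrop']
      have hm : PySem.Int.mod (((i + 1 : Nat)) : Int) 2 = (((i + 1 : Nat)) : Int) % 2 :=
        PySem.Int.mod_eq_emod_of_pos (by omega)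
      have hb : (PySem.Int.mod (((i + 1 : Nat)) : Int) 2 == 0 && (((i + 1 : Nat)) : Int) != (s.length : Int))
          = decide ((i + 1) % 2 = 0 ∧ (i + 1) ≠ s.length) := by
        rw [hm]
        rcases Nat.even_or_odd (i + 1) with h | h <;>
          · simp only [Bool.and_eq_decide, decide_eq_decide, beq_iff_eq, bne_iff_ne]
            constructor <;> intro hh <;> [skip; skip] <;> omega
      simp only [hget', hb, pvG]
      by_cases hcond : (i + 1) % 2 = 0 ∧ (i + 1) ≠ s.length
      · rw [if_pos (decide_eq_true hcond), if_pos hcond]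
        simp
      · rw [if_neg (by simpa using hcond), if_neg hcond]
        simp

-- proof-side chunk view of the index loop
def pvChunks : List Char → List (List Char)
  | [] => []
  | [a] => [[a]]
  | a :: b :: rest => [a, b] :: pvChunks rest

lemma pv_parts_eq (s : List Char) : ∀ (k i : Nat), s.length - i ≤ k →
    pvParts s i = (pvChunks (s.drop i)).map pvChunkBits := by
  intro k
  induction k with
  | zero =>
      intro i h
      rw [pvParts, if_neg (by omega), List.drop_eq_nil_iff.mpr (by omega)]
      simp [pvChunks]
  | succ k ihk =>
      intro i h
      rw [pvParts]
      by_cases hlt : i < s.length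
      · rw [if_pos hlt, ihk (i + 2) (by omega)]
        have hsl : PySem.List.slice s (some (i : Int)) (some ((i : Int) + 2))
            = (s.drop i).take 2 := by
          have := PySem.List.slice_natCast_add (xs := s) (j := i) (n := 2)
          simpa using this
        have hdd : s.drop (i + 2) = (s.drop i).drop 2 := by
          rw [List.drop_drop, Nat.add_comm]
        have hne : s.drop i ≠ [] := by
          intro hd
          have := List.drop_eq_nil_iff.mp hd
          omega
        rw [hsl, hdd]
        cases hd : s.drop i with
        | nil => exact absurd hd hne
        | cons a t =>
            cases t with
            | nil => simp [pvChunks]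
            | cons b r => simp [pvChunks]
      · rw [if_neg hlt, List.drop_eq_nil_iff.mpr (by omega)]
        simp [pvChunks]

lemma pvChunks_ne_nil (l : List Char) (h : l ≠ []) : pvChunks l ≠ [] := by
  match l with
  | [] => exact absurd rfl h
  | [a] => simp [pvChunks]
  | a :: b :: r => simp [pvChunks]

lemma pv_gChunks : ∀ (s : List Char) (i : Nat), i % 2 = 0 →
    pvG s i (i + s.length) = pvJoin ((pvChunks s).map pvChunkBits) := by
  intro s
  induction s using pvChunks.induct with
  | case1 => intro i _; simp [pvG, pvChunks, pvJoin]
  | case2 a => intro i _; simp [pvG, pvChunks, pvJoin, pvChunkBits]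
  | case3 a b rest ih =>
      intro i hi
      have hn : i + (a :: b :: rest).length = (i + 2) + rest.length := by simp; omega
      by_cases hr : rest = []
      · subst hr
        simp only [pvG, pvChunks, List.map_cons, List.map_nil, pvJoin, List.length_cons,
          List.length_nil]
        rw [if_neg (by omega), if_neg (by omega)]
        simp [pvChunkBits]
      · obtain ⟨y, ys, hmap⟩ : ∃ y ys, (pvChunks rest).map pvChunkBits = y :: ys := by
          cases hpc : pvChunks rest with
          | nil => exact absurd hpc (pvChunks_ne_nil rest hr)
          | cons y ys => exact ⟨pvChunkBits y, ys.map pvChunkBits, rfl⟩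
        have hlen : rest.length ≠ 0 := by
          simpa [List.length_eq_zero_iff] using hr
        simp only [pvG, pvChunks, List.map_cons, hmap, List.length_cons]
        rw [if_neg (by omega), if_pos (by constructor <;> omega)]
        rw [show i + 1 + 1 = i + 2 by omega, show i + (rest.length + 1 + 1) = (i + 2) + rest.length by omega]
        rw [ih (i + 2) (by omega), hmap]
        cases ys with
        | nil => simp [pvJoin, pvChunkBits]
        | cons z zs => simp [pvJoin, pvChunkBits]

-- ===== VERDICT (by name: the statement is the Claim_ definition above) =====
theorem byte_to_bit_spec : Claim_equal_byte_to_bit := by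
  intro in_byte _ _
  unfold Spec_byte_to_bit byte_to_bit byte_to_bit_alt
  set s := (PySem.Str.replace in_byte " " "").toList with hs
  have h1 := pv_loopA s s 0 [] rfl
  simp only [Nat.cast_zero] at h1
  have h2 := pv_gChunks s 0 (by omega)
  simp only [Nat.zero_add] at h2
  have h3 := pv_parts_eq s s.length 0 (by omega)
  simp only [List.drop_zero] at h3
  simp only [h1, List.nil_append, h2, h3]
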